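-- pv_equiv track=rewrite | github.com/Viknesh-Rajaramon/Leetcode-Problems | Algorithms/Medium/3728_Stable_Subarrays_With_Equal_Boundary_and_Interior_Sum.py | countStableSubarrays
-- ===== SOURCE A (Python) =====
-- from typing import List
-- from collections import defaultdict
--
-- def countStableSubarrays(capacity: List[int]) -> int:
--     n, result, prev, map_ = len(capacity), 0, 0, defaultdict(lambda: defaultdict(int))
--     for i in range(n):
--         result += map_[capacity[i]][prev - capacity[i]]
--         prev += capacity[i]
--         map_[capacity[i]][prev] += 1
--         if i > 0 and capacity[i] == 0 and capacity[i-1] == 0: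
--             result -= 1
--
--     return result
-- ===== SOURCE B (Python) =====
-- from typing import List
-- from itertools import accumulate
--
-- def countStableSubarrays(capacity: List[int]) -> int:
--     n = len(capacity)
--     P = [0] + list(accumulate(capacity))
--     total = 0
--     for l in range(n):
--         cl = capacity[l]
--         base = P[l + 1] + cl
--         for r in range(l + 2, n):
--             if capacity[r] == cl and P[r] == base:
--                 total += 1
--     return total
-- ===== Notes on version B (the rewrite author's own statement) =====
-- stated objective: simpler
-- what changed: Replaced A's single-pass nested-defaultdict prefix-sum bookkeeping (with an adjacent-zeros correction) by a direct brute-force scan that tests every subarray of length >= 3 against precomputed prefix sums.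
import Mathlib
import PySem

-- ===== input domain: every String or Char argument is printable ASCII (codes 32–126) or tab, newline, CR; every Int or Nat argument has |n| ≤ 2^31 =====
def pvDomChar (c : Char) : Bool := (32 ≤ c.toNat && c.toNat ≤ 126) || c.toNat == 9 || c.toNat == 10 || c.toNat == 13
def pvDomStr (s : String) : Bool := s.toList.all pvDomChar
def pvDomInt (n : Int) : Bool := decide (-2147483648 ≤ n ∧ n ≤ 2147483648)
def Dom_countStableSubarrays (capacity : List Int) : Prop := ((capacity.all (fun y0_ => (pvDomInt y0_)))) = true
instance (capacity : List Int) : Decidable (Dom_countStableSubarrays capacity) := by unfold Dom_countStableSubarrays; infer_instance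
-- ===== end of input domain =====

-- B replaces A's single-pass nested-hashmap bookkeeping by a direct brute-force test of
-- every subarray of length ≥ 3 over precomputed prefix sums (objective: simpler; not faster).

-- ===== PORT A =====
-- one loop iteration of A (result, prev, map_) at index i
def stepA (capacity : List Int) (st : Int × Int × PySem.Dict Int (PySem.Dict Int Int)) (i : Int) :
    Int × Int × PySem.Dict Int (PySem.Dict Int Int) :=
  let c := PySem.List.pyGetD capacity i 0
  let result := st.1 + ((st.2.2.getD c PySem.Dict.empty).getD (st.2.1 - c) 0)
  let prev := st.2.1 + c
  let map_ := st.2.2.insert c ((st.2.2.getD c PySem.Dict.empty).modify prev 0 (· + 1))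
  let result := if i > 0 ∧ c = 0 ∧ PySem.List.pyGetD capacity (i - 1) 0 = 0 then result - 1 else result
  (result, prev, map_)

def countStableSubarrays (capacity : List Int) : Int :=
  ((PySem.List.pyRange 0 (capacity.length : Int) 1).foldl (stepA capacity)
    (0, 0, PySem.Dict.empty)).1

-- ===== PORT B =====
def countStableSubarrays_alt (capacity : List Int) : Int :=
  let n : Int := capacity.length
  let P : List Int := capacity.scanl (· + ·) 0
  (PySem.List.pyRange 0 n 1).foldl (fun tot l =>
    let cl := PySem.List.pyGetD capacity l 0
    let base := PySem.List.pyGetD P (l + 1) 0 + cl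
    (PySem.List.pyRange (l + 2) n 1).foldl (fun tot r =>
      if PySem.List.pyGetD capacity r 0 = cl ∧ PySem.List.pyGetD P r 0 = base
      then tot + 1 else tot) tot) 0

-- ===== PRECONDITION & SPEC =====
def Spec_countStableSubarrays (capacity : List Int) (out : Int) : Prop := out = countStableSubarrays_alt capacity
instance (capacity : List Int) (out : Int) : Decidable (Spec_countStableSubarrays capacity out) := by unfold Spec_countStableSubarrays; infer_instance

-- ===== CLAIM (what is proved, stated in full; the proofs are below) =====
def Claim_equal_countStableSubarrays : Prop := ∀ (capacity : List Int), Dom_countStableSubarrays capacity → Spec_countStableSubarrays capacity (countStableSubarrays capacity)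

-- ===== LEMMAS AND PROOFS =====

-- element i (0 as out-of-range default; indices used are always in range)
def px (xs : List Int) (j : Nat) : Int := xs.getD j 0
-- prefix sum P k = sum of the first k elements
def pS (xs : List Int) (k : Nat) : Int := (xs.take k).sum
-- number of j < i with xs[j] = v and P (j+1) = s (contents of A's nested map)
def cnt (xs : List Int) (i : Nat) (v s : Int) : Int :=
  ∑ j ∈ Finset.range i, (if px xs j = v ∧ pS xs (j+1) = s then 1 else 0)
-- A's adjacent-zero correction at index i
def zA (xs : List Int) (i : Nat) : Int :=
  if 0 < i ∧ px xs i = 0 ∧ px xs (i-1) = 0 then 1 else 0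
-- A's accumulated result after i iterations
def resA (xs : List Int) (i : Nat) : Int :=
  ∑ k ∈ Finset.range i, (cnt xs k (px xs k) (pS xs k - px xs k) - zA xs k)
-- indicator of a stable subarray with left end l and right end r
def F (xs : List Int) (l r : Nat) : Int :=
  if l + 2 ≤ r ∧ px xs l = px xs r ∧ pS xs r - pS xs (l+1) = px xs l then 1 else 0

lemma pS_succ (xs : List Int) (i : Nat) (hi : i < xs.length) :
    pS xs (i+1) = pS xs i + px xs i := by
  unfold pS px
  rw [List.take_add_one, List.sum_append, List.getElem?_eq_getElem hi]
  simp [List.getD_eq_getElem?_getD, List.getElem?_eq_getElem hi]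

lemma scanl_getD (xs : List Int) : ∀ (a : Int) (k : Nat), k ≤ xs.length →
    (xs.scanl (· + ·) a).getD k 0 = a + (xs.take k).sum := by
  induction xs with
  | nil =>
    intro a k hk
    simp [Nat.le_zero.mp (by simpa using hk)]
  | cons x xs ih =>
    intro a k hk
    cases k with
    | zero => simp
    | succ k =>
      simp only [List.scanl_cons, List.getD_cons_succ, List.take_succ_cons, List.sum_cons]
      rw [ih (a + x) k (by simpa using hk)]; ring

lemma sum_map_range (g : Nat → Int) (m : Nat) :
    ((List.range m).map g).sum = ∑ k ∈ Finset.range m, g k := by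
  induction m with
  | zero => simp
  | succ m ih => simp [List.range_succ, Finset.sum_range_succ, ih]

lemma foldl_if_one {α : Type} (p : α → Prop) [DecidablePred p] :
    ∀ (L : List α) (t0 : Int),
      L.foldl (fun t a => if p a then t + 1 else t) t0
        = t0 + ((L.map (fun a => if p a then (1:Int) else 0)).sum) := by
  intro L
  induction L with
  | nil => simp
  | cons x L ih =>
    intro t0
    simp only [List.foldl_cons, List.map_cons, List.sum_cons, ih]
    split_ifs <;> ring

lemma foldl_add_sum (f : Nat → Int) :
    ∀ (m : Nat) (t0 : Int),
      (List.range m).foldl (fun t l => t + f l) t0 = t0 + ∑ l ∈ Finset.range m, f l := by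
  intro m
  induction m with
  | zero => simp
  | succ m ih =>
    intro t0
    simp only [List.range_succ, List.foldl_append, List.foldl_cons, List.foldl_nil,
      Finset.sum_range_succ, ih]
    ring

-- A's loop invariant: after i iterations the state is (resA i, P i, m) with m counting prefixes
lemma A_inv (xs : List Int) : ∀ (i : Nat), i ≤ xs.length →
    ∃ m : PySem.Dict Int (PySem.Dict Int Int),
      ((PySem.List.pyRange 0 (i : Int) 1).foldl (stepA xs) (0, 0, PySem.Dict.empty))
        = (resA xs i, pS xs i, m)
      ∧ ∀ v s : Int, ((m.getD v PySem.Dict.empty).getD s 0) = cnt xs i v s := by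
  intro i
  induction i with
  | zero =>
    intro _
    exact ⟨PySem.Dict.empty, by simp [resA, pS, PySem.List.pyRange], by intro v s; simp [cnt]⟩
  | succ i ih =>
    intro hi
    obtain ⟨m, hfold, hm⟩ := ih (Nat.le_of_succ_le hi)
    have hilen : i < xs.length := hi
    have hget : PySem.List.pyGetD xs (i : Int) 0 = px xs i := by
      simp [px, PySem.List.pyGetD_natCast]
    have hrange : PySem.List.pyRange 0 ((i+1 : Nat) : Int) 1
        = PySem.List.pyRange 0 (i : Int) 1 ++ [(i : Int)] := by
      have : ((i+1 : Nat) : Int) = (i : Int) + 1 := by push_cast; ring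
      rw [this, PySem.List.pyRange_one_succ_right (by positivity)]
    refine ⟨(m.insert (px xs i)
      ((m.getD (px xs i) PySem.Dict.empty).modify (pS xs (i+1)) 0 (· + 1))), ?_, ?_⟩
    · rw [hrange, List.foldl_append, hfold]
      simp only [List.foldl_cons, List.foldl_nil]
      unfold stepA
      simp only [hget, hm]
      have hprev : pS xs i + px xs i = pS xs (i+1) := (pS_succ xs i hilen).symm
      rw [hprev]
      have hres : (if (i : Int) > 0 ∧ px xs i = 0 ∧ PySem.List.pyGetD xs ((i : Int) - 1) 0 = 0
          then resA xs i + cnt xs i (px xs i) (pS xs i - px xs i) - 1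
          else resA xs i + cnt xs i (px xs i) (pS xs i - px xs i)) = resA xs (i+1) := by
        have hsucc : resA xs (i+1)
            = resA xs i + (cnt xs i (px xs i) (pS xs i - px xs i) - zA xs i) := by
          unfold resA; rw [Finset.sum_range_succ]
        rw [hsucc]
        rcases Nat.eq_zero_or_pos i with h0 | h0
        · subst h0
          rw [if_neg (by rintro ⟨h, -⟩; exact absurd h (by norm_num)), zA,
            if_neg (by rintro ⟨h, -⟩; exact absurd h (by omega))]
          ring
        · have hm1 : ((i : Int) - 1) = ((i - 1 : Nat) : Int) := by omega
          rw [hm1, PySem.List.pyGetD_natCast]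
          have hpos : ((0:Int) < (i : Int)) := by exact_mod_cast h0
          simp only [zA, gt_iff_lt, hpos, h0, true_and, px]
          by_cases hc : xs.getD i 0 = 0 ∧ xs.getD (i - 1) 0 = 0
          · rw [if_pos hc, if_pos hc]; try ring
          · rw [if_neg hc, if_neg hc]; try ring
      rw [← hres]
    · have hcnt_succ : ∀ v s : Int, cnt xs (i+1) v s
          = cnt xs i v s + (if px xs i = v ∧ pS xs (i+1) = s then 1 else 0) := by
        intro v s; unfold cnt; rw [Finset.sum_range_succ]
      intro v s
      rw [PySem.Dict.getD_insert, hcnt_succ]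
      by_cases hv : v = px xs i
      · subst hv
        rw [if_pos rfl, PySem.Dict.getD_modify, hm]
        by_cases hs : s = pS xs (i+1)
        · subst hs; simp
        · rw [if_neg hs, if_neg (fun h => hs h.2.symm), hm]; ring
      · rw [if_neg hv, hm, if_neg (fun h => hv h.1.symm)]
        ring

lemma A_eq (xs : List Int) : countStableSubarrays xs = resA xs xs.length := by
  obtain ⟨m, hfold, _⟩ := A_inv xs xs.length le_rfl
  unfold countStableSubarrays
  rw [hfold]

-- the right-end-indexed count at r = i equals A's per-step increment minus its correction
lemma step_eq (xs : List Int) (i : Nat) (hi : i < xs.length) :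
    cnt xs i (px xs i) (pS xs i - px xs i) - zA xs i
      = ∑ l ∈ Finset.range xs.length, F xs l i := by
  have hres : ∑ l ∈ Finset.range xs.length, F xs l i = ∑ l ∈ Finset.range i, F xs l i := by
    refine (Finset.sum_subset
      (fun x hx => Finset.mem_range.mpr (lt_of_lt_of_le (Finset.mem_range.mp hx) hi.le)) ?_).symm
    intro l _ hl
    have hli : i ≤ l := by simpa using hl
    unfold F
    rw [if_neg]
    rintro ⟨h1, -⟩; omega
  rw [hres]
  cases i with
  | zero => simp [cnt, zA]
  | succ k =>
    rw [cnt, Finset.sum_range_succ, Finset.sum_range_succ]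
    have hcongr : ∀ j ∈ Finset.range k,
        (if px xs j = px xs (k+1) ∧ pS xs (j+1) = pS xs (k+1) - px xs (k+1) then (1:Int) else 0)
          = F xs j (k+1) := by
      intro j hj
      have hjk := Finset.mem_range.mp hj
      unfold F
      refine if_congr ?_ rfl rfl
      constructor
      · rintro ⟨h1, h2⟩; exact ⟨by omega, h1, by linarith⟩
      · rintro ⟨-, h1, h2⟩; exact ⟨h1, by linarith⟩
    rw [Finset.sum_congr rfl hcongr]
    have hF : F xs k (k+1) = 0 := by
      unfold F
      rw [if_neg]
      rintro ⟨h1, -⟩; omega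
    have hz : (if px xs k = px xs (k+1) ∧ pS xs (k+1) = pS xs (k+1) - px xs (k+1)
        then (1:Int) else 0) = zA xs (k+1) := by
      unfold zA
      simp only [Nat.add_sub_cancel]
      refine if_congr ?_ rfl rfl
      constructor
      · rintro ⟨h1, h2⟩
        have h3 : px xs (k+1) = 0 := by linarith
        exact ⟨Nat.succ_pos k, h3, by rw [h1, h3]⟩
      · rintro ⟨-, h1, h2⟩
        exact ⟨by rw [h1, h2], by rw [h1]; ring⟩
    rw [hz, hF]
    ring

lemma B_inner (xs : List Int) (l : Nat) (t0 : Int) :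
    (PySem.List.pyRange ((l : Int) + 2) (xs.length : Int) 1).foldl
      (fun tot r =>
        if PySem.List.pyGetD xs r 0 = PySem.List.pyGetD xs (l : Int) 0 ∧
           PySem.List.pyGetD (xs.scanl (· + ·) 0) r 0
             = PySem.List.pyGetD (xs.scanl (· + ·) 0) ((l : Int) + 1) 0
               + PySem.List.pyGetD xs (l : Int) 0
        then tot + 1 else tot) t0
      = t0 + ∑ r ∈ Finset.range xs.length, F xs l r := by
  have hsum : ∑ r ∈ Finset.range xs.length, F xs l r
      = ∑ k ∈ Finset.range (xs.length - (l + 2)), F xs l (l + 2 + k) := by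
    rw [← Finset.sum_Ico_eq_sum_range]
    refine (Finset.sum_subset ?_ ?_).symm
    · intro r hr
      exact Finset.mem_range.mpr (Finset.mem_Ico.mp hr).2
    · intro r hrange hr
      unfold F
      rw [if_neg]
      rintro ⟨h1, -⟩
      exact hr (Finset.mem_Ico.mpr ⟨h1, Finset.mem_range.mp hrange⟩)
  rw [hsum, PySem.List.pyRange_one, List.foldl_map]
  have hm : (((xs.length : Int)) - ((l : Int) + 2)).toNat = xs.length - (l + 2) := by omega
  rw [foldl_if_one (fun k : Nat =>
      PySem.List.pyGetD xs ((l : Int) + 2 + (k : Int)) 0 = PySem.List.pyGetD xs (l : Int) 0 ∧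
      PySem.List.pyGetD (xs.scanl (· + ·) 0) ((l : Int) + 2 + (k : Int)) 0
        = PySem.List.pyGetD (xs.scanl (· + ·) 0) ((l : Int) + 1) 0
          + PySem.List.pyGetD xs (l : Int) 0),
    sum_map_range, hm]
  congr 1
  refine Finset.sum_congr rfl ?_
  intro k hk
  have hklt := Finset.mem_range.mp hk
  have hrn : l + 2 + k < xs.length := by omega
  have hc1 : ((l : Int) + 2 + (k : Int)) = ((l + 2 + k : Nat) : Int) := by push_cast; ring
  have hc2 : ((l : Int) + 1) = ((l + 1 : Nat) : Int) := by push_cast; ring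
  rw [hc1, hc2, PySem.List.pyGetD_natCast, PySem.List.pyGetD_natCast,
    PySem.List.pyGetD_natCast, PySem.List.pyGetD_natCast,
    scanl_getD xs 0 (l + 2 + k) (by omega), scanl_getD xs 0 (l + 1) (by omega)]
  unfold F
  refine if_congr ?_ rfl rfl
  simp only [px, pS]
  constructor
  · rintro ⟨h1, h2⟩; exact ⟨by omega, h1.symm, by linarith⟩
  · rintro ⟨-, h1, h2⟩; exact ⟨h1.symm, by linarith⟩

lemma B_eq (xs : List Int) :
    countStableSubarrays_alt xs
      = ∑ l ∈ Finset.range xs.length, ∑ r ∈ Finset.range xs.length, F xs l r := by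
  simp only [countStableSubarrays_alt]
  rw [PySem.List.pyRange_zero_natCast, List.foldl_map]
  have hfun : (fun (tot : Int) (l : Nat) =>
      (PySem.List.pyRange ((l : Int) + 2) (xs.length : Int) 1).foldl
        (fun tot r =>
          if PySem.List.pyGetD xs r 0 = PySem.List.pyGetD xs (l : Int) 0 ∧
             PySem.List.pyGetD (xs.scanl (· + ·) 0) r 0
               = PySem.List.pyGetD (xs.scanl (· + ·) 0) ((l : Int) + 1) 0
                 + PySem.List.pyGetD xs (l : Int) 0
          then tot + 1 else tot) tot)
      = fun (tot : Int) (l : Nat) => tot + ∑ r ∈ Finset.range xs.length, F xs l r := by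
    funext tot l
    exact B_inner xs l tot
  rw [hfun, foldl_add_sum (fun l => ∑ r ∈ Finset.range xs.length, F xs l r) xs.length 0]
  ring

-- ===== VERDICT (by name: the statement is the Claim_ definition above) =====
theorem countStableSubarrays_spec : Claim_equal_countStableSubarrays := by
  intro xs _
  unfold Spec_countStableSubarrays
  rw [A_eq, B_eq, Finset.sum_comm]
  refine Finset.sum_congr rfl ?_
  intro i hiF
  exact step_eq xs i (Finset.mem_range.mp hiF)
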